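-- pv_equiv track=rewrite | github.com/TomasCastroR/Prog2_TP1 | TrabajoPractico.py | SepararPor
-- ===== SOURCE A (Python) =====
-- def SepararPor (Lista, Dato):
--     if Dato == "Edad":
--         Personas_11_y_14 = []
--         Personas_15_y_17 = []
--         Personas_18_mas = []
--         for Persona in Lista:
--             if int(Persona[1]) < 15:
--                 Personas_11_y_14 += [Persona]
--             elif int(Persona[1]) < 18:
--                 Personas_15_y_17 += [Persona]
--             else:
--                 Personas_18_mas += [Persona]
--         ListaFinal = [Personas_11_y_14] + [Personas_15_y_17] + [Personas_18_mas]
--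
--     elif Dato == "Genero":
--         HombresHetero = []
--         MujeresHetero = []
--         HombresHomo= []
--         MujeresHomo = []
--         HombresBi = []
--         MujeresBi = []
--         for Persona in Lista:
--             if Persona[2] == "M" and Persona[3] == "F":
--                 HombresHetero += [Persona]
--             elif Persona[2] == "F" and Persona[3] == "M":
--                 MujeresHetero += [Persona]
--             elif Persona[2] == "M" and Persona[3] == "M":
--                 HombresHomo += [Persona]
--             elif Persona[2] == "F" and Persona[3] == "F":
--                 MujeresHomo += [Persona]
--             elif Persona[2] == "M" and Persona[3] == "A":
--                 HombresBi += [Persona]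
--             elif Persona[2] == "F" and Persona[3] == "A":
--                 MujeresBi += [Persona]
--         ListaFinal = [HombresHetero] + [MujeresHetero] + [HombresHomo] + [MujeresHomo] + [HombresBi] + [MujeresBi]
--     return ListaFinal
-- ===== SOURCE B (Python) =====
-- def SepararPor(Lista, Dato):
--     if Dato == "Edad":
--         return [[P for P in Lista if int(P[1]) < 15],
--                 [P for P in Lista if 15 <= int(P[1]) < 18],
--                 [P for P in Lista if int(P[1]) >= 18]]
--     if Dato == "Genero":
--         return [[P for P in Lista if P[2] == a and P[3] == b]
--                 for a, b in (("M", "F"), ("F", "M"), ("M", "M"),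
--                              ("F", "F"), ("M", "A"), ("F", "A"))]
--     raise ValueError("Dato must be 'Edad' or 'Genero'")
-- ===== Notes on version B (the rewrite author's own statement) =====
-- stated objective: simpler
-- what changed: Replaced the single accumulate-into-six-named-variables loop and its if/elif ladders with per-bucket filter comprehensions: three age filters, and the six gender buckets produced by mapping a list of the valid (sex, orientation) key pairs to a filter.
import Mathlib
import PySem

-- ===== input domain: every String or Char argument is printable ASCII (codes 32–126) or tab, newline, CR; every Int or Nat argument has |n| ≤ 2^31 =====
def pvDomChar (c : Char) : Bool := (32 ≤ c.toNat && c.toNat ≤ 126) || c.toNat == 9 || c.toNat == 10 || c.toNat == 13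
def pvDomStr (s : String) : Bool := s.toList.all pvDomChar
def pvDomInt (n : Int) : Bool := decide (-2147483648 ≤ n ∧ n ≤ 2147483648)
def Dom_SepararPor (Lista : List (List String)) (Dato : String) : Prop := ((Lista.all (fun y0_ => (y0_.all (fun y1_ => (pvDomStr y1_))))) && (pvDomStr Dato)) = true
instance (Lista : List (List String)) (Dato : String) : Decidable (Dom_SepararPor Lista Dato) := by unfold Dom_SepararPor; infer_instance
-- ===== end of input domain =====

-- One honest line: B replaces A's single loop that appends to named bucket variables by
-- per-bucket filter comprehensions (three age filters; the six gender buckets by mapping a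
-- list of the valid key pairs to a filter); same cost, shorter and plainer.

-- ===== PORT A =====
-- int(Persona[1]) of A; under Pre_ the Option is some, .getD 0 is never reached there
def pvAgeA (P : List String) : Int := ((PySem.List.pyGet? P 1).bind PySem.Int.ofStr?).getD 0
-- Persona[i] of A; under Pre_ every evaluated access is in range, .getD "" is never reached there
def pvGetA (P : List String) (i : Int) : String := (PySem.List.pyGet? P i).getD ""

def pvStepE (s : List (List String) × List (List String) × List (List String)) (P : List String) :
    List (List String) × List (List String) × List (List String) :=
  if pvAgeA P < 15 then (s.1 ++ [P], s.2.1, s.2.2)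
  else if pvAgeA P < 18 then (s.1, s.2.1 ++ [P], s.2.2)
  else (s.1, s.2.1, s.2.2 ++ [P])

def pvStepG (s : List (List String) × List (List String) × List (List String) ×
    List (List String) × List (List String) × List (List String)) (P : List String) :
    List (List String) × List (List String) × List (List String) ×
    List (List String) × List (List String) × List (List String) :=
  if pvGetA P 2 == "M" && pvGetA P 3 == "F" then (s.1 ++ [P], s.2.1, s.2.2.1, s.2.2.2.1, s.2.2.2.2.1, s.2.2.2.2.2)
  else if pvGetA P 2 == "F" && pvGetA P 3 == "M" then (s.1, s.2.1 ++ [P], s.2.2.1, s.2.2.2.1, s.2.2.2.2.1, s.2.2.2.2.2)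
  else if pvGetA P 2 == "M" && pvGetA P 3 == "M" then (s.1, s.2.1, s.2.2.1 ++ [P], s.2.2.2.1, s.2.2.2.2.1, s.2.2.2.2.2)
  else if pvGetA P 2 == "F" && pvGetA P 3 == "F" then (s.1, s.2.1, s.2.2.1, s.2.2.2.1 ++ [P], s.2.2.2.2.1, s.2.2.2.2.2)
  else if pvGetA P 2 == "M" && pvGetA P 3 == "A" then (s.1, s.2.1, s.2.2.1, s.2.2.2.1, s.2.2.2.2.1 ++ [P], s.2.2.2.2.2)
  else if pvGetA P 2 == "F" && pvGetA P 3 == "A" then (s.1, s.2.1, s.2.2.1, s.2.2.2.1, s.2.2.2.2.1, s.2.2.2.2.2 ++ [P])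
  else s

def SepararPor (Lista : List (List String)) (Dato : String) : List (List (List String)) :=
  if Dato == "Edad" then
    let s := Lista.foldl pvStepE ([], [], [])
    [s.1] ++ [s.2.1] ++ [s.2.2]
  else if Dato == "Genero" then
    let s := Lista.foldl pvStepG ([], [], [], [], [], [])
    [s.1] ++ [s.2.1] ++ [s.2.2.1] ++ [s.2.2.2.1] ++ [s.2.2.2.2.1] ++ [s.2.2.2.2.2]
  else []    -- Python A: UnboundLocalError; excluded by Pre_

-- ===== PORT B =====
-- int(P[1]) of B (same Python expression as in A, ported the same way)
def pvAgeB (P : List String) : Int := ((PySem.List.pyGet? P 1).bind PySem.Int.ofStr?).getD 0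
-- P[i] of B; under Pre_ every evaluated access is in range, .getD "" is never reached there
def pvGetB (P : List String) (i : Int) : String := (PySem.List.pyGet? P i).getD ""

def pvGenKeys : List (String × String) := [("M","F"), ("F","M"), ("M","M"), ("F","F"), ("M","A"), ("F","A")]

def SepararPor_alt (Lista : List (List String)) (Dato : String) : List (List (List String)) :=
  if Dato == "Edad" then
    [Lista.filter (fun P => pvAgeB P < 15),
     Lista.filter (fun P => decide (15 ≤ pvAgeB P) && decide (pvAgeB P < 18)),
     Lista.filter (fun P => decide (18 ≤ pvAgeB P))]
  else if Dato == "Genero" then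
    pvGenKeys.map (fun k => Lista.filter (fun P => pvGetB P 2 == k.1 && pvGetB P 3 == k.2))
  else []    -- Python B: ValueError; excluded by Pre_

-- ===== PRECONDITION & SPEC =====
-- Pre_ excludes exactly the inputs where the Python A raises: a Dato other than "Edad"/"Genero"
-- (UnboundLocalError), an "Edad" row whose field 1 is missing or not int-parseable
-- (IndexError/ValueError), and a "Genero" row shorter than 3, or of length 3 whose field 2
-- is "M"/"F" so that field 3 is accessed (IndexError). (B raises on exactly the same inputs.)
def pvRowEdad (P : List String) : Bool := ((PySem.List.pyGet? P 1).bind PySem.Int.ofStr?).isSome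
def pvRowGen (P : List String) : Bool :=
  match PySem.List.pyGet? P 2 with
  | none => false
  | some s => if s == "M" || s == "F" then decide (4 ≤ P.length) else true

def Pre_SepararPor (Lista : List (List String)) (Dato : String) : Prop :=
  (Dato = "Edad" ∧ Lista.all pvRowEdad = true) ∨ (Dato = "Genero" ∧ Lista.all pvRowGen = true)
instance (Lista : List (List String)) (Dato : String) : Decidable (Pre_SepararPor Lista Dato) := by
  unfold Pre_SepararPor; infer_instance
def pvWitness_SepararPor : List (List String) × String := ([["Ana", "12", "F", "M"], ["Bo", "19", "M", "A"]], "Edad")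

def Spec_SepararPor (Lista : List (List String)) (Dato : String) (out : List (List (List String))) : Prop := out = SepararPor_alt Lista Dato
instance (Lista : List (List String)) (Dato : String) (out : List (List (List String))) : Decidable (Spec_SepararPor Lista Dato out) := by unfold Spec_SepararPor; infer_instance

-- ===== CLAIM (what is proved, stated in full; the proofs are below) =====
def Claim_equal_SepararPor : Prop := ∀ (Lista : List (List String)) (Dato : String), Dom_SepararPor Lista Dato → Pre_SepararPor Lista Dato → Spec_SepararPor Lista Dato (SepararPor Lista Dato)

-- ===== LEMMAS AND PROOFS =====

lemma foldE_inv (l : List (List String)) (x y z : List (List String)) :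
    l.foldl pvStepE (x, y, z) =
      (x ++ l.filter (fun P => pvAgeA P < 15),
       y ++ l.filter (fun P => decide (15 ≤ pvAgeA P) && decide (pvAgeA P < 18)),
       z ++ l.filter (fun P => decide (18 ≤ pvAgeA P))) := by
  induction l generalizing x y z with
  | nil => simp
  | cons P t ih =>
    simp only [List.foldl_cons, List.filter_cons]
    by_cases h1 : pvAgeA P < 15
    · rw [show pvStepE (x, y, z) P = (x ++ [P], y, z) by simp [pvStepE, h1], ih]
      have h2 : ¬ (15 ≤ pvAgeA P) := by omega
      have h2b : pvAgeA P < 18 := by omega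
      simp [h1, h2, h2b]
    · by_cases h2 : pvAgeA P < 18
      · rw [show pvStepE (x, y, z) P = (x, y ++ [P], z) by simp [pvStepE, h1, h2], ih]
        have h3 : 15 ≤ pvAgeA P := by omega
        have h4 : ¬ (18 ≤ pvAgeA P) := by omega
        simp [h1, h2, h3, h4]
      · rw [show pvStepE (x, y, z) P = (x, y, z ++ [P]) by simp [pvStepE, h1, h2], ih]
        have h3 : 18 ≤ pvAgeA P := by omega
        simp [h1, h2, h3]

def pvG (a b : String) (P : List String) : Bool := pvGetA P 2 == a && pvGetA P 3 == b

lemma foldG_inv (l : List (List String)) (x1 x2 x3 x4 x5 x6 : List (List String)) :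
    l.foldl pvStepG (x1, x2, x3, x4, x5, x6) =
      (x1 ++ l.filter (pvG "M" "F"), x2 ++ l.filter (pvG "F" "M"),
       x3 ++ l.filter (pvG "M" "M"), x4 ++ l.filter (pvG "F" "F"),
       x5 ++ l.filter (pvG "M" "A"), x6 ++ l.filter (pvG "F" "A")) := by
  induction l generalizing x1 x2 x3 x4 x5 x6 with
  | nil => simp
  | cons P t ih =>
    simp only [List.foldl_cons, List.filter_cons]
    by_cases hM : pvGetA P 2 = "M" <;> by_cases hF : pvGetA P 2 = "F"
    · rw [hM] at hF; exact absurd hF (by decide)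
    all_goals by_cases o1 : pvGetA P 3 = "F" <;> by_cases o2 : pvGetA P 3 = "M" <;>
      [skip; skip; skip; by_cases o3 : pvGetA P 3 = "A"] <;>
      first
        | (rw [o1] at o2; exact absurd o2 (by decide))
        | (rw [show pvStepG (x1, x2, x3, x4, x5, x6) P = _ from rfl, pvStepG, ih]
           simp_all [pvG])

-- ===== VERDICT (by name: the statement is the Claim_ definition above) =====
theorem SepararPor_spec : Claim_equal_SepararPor := by
  intro Lista Dato _ hpre
  unfold Spec_SepararPor SepararPor SepararPor_alt
  rcases hpre with ⟨rfl, _⟩ | ⟨rfl, _⟩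
  · simp only [if_pos (by decide : ("Edad" == "Edad") = true)]
    rw [foldE_inv]
    rfl
  · simp only [if_neg (by decide : ¬ ("Genero" == "Edad") = true),
      if_pos (by decide : ("Genero" == "Genero") = true)]
    rw [foldG_inv]
    rfl
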